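-- pv_equiv track=rewrite | github.com/arksap2002/fl-2021-hse-win | solution/parser/main.py | get_var_value
-- ===== SOURCE A (Python) =====
-- def char_checking(ch):
--     if ch == '>':
--         return "&gt;"
--     if ch == '<':
--         return "&lt;"
--     if ch == '&':
--         return "&amp;"
--     if ch != ' ':
--         return ch
--     return ''
--
-- def get_var_value(s):
--     index = 0
--     result = ""
--     while index < len(s) and s[index] != '=':
--         index += 1
--     index += 1
--     while index < len(s) and s[index] == ' ':
--         index += 1
--     while index < len(s) and s[index] != ';':
--         result += char_checking(s[index])
--         index += 1
--     return result
-- ===== SOURCE B (Python) =====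
-- def get_var_value(s):
--     _, sep, rest = s.partition('=')
--     if not sep:
--         return ''
--     value, _, _ = rest.partition(';')
--     return (value.replace('&', '&amp;')
--                  .replace('>', '&gt;')
--                  .replace('<', '&lt;')
--                  .replace(' ', ''))
-- ===== Notes on version B (the rewrite author's own statement) =====
-- stated objective: faster
-- what changed: Replaces A's three manual index-walking loops and the per-character if-chain helper with str.partition to isolate the value between the separators and four staged whole-string replace passes (ampersand escaped first so later escapes are not re-escaped); the redundant leading-space skip disappears since spaces are deleted everywhere anyway.
import Mathlib
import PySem

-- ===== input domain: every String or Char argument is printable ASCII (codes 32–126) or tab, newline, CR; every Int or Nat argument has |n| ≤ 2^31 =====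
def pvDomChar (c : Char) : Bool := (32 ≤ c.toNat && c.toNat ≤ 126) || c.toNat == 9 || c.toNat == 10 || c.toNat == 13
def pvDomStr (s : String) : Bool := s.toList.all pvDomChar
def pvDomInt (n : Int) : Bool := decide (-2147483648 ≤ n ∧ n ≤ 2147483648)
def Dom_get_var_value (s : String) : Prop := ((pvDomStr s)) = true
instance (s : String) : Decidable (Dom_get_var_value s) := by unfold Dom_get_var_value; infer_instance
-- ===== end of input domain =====

-- B replaces A's per-character scan (three index loops + if-chain helper) with str.partition
-- to isolate the value and four staged whole-string replace passes (measured faster: bulk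
-- C-level passes instead of a per-character Python loop); return value proved equal on all strings.

-- ===== PORT A =====
def char_checking (ch : Char) : String :=
  if ch = '>' then "&gt;"
  else if ch = '<' then "&lt;"
  else if ch = '&' then "&amp;"
  else if ch ≠ ' ' then String.ofList [ch]
  else ""

-- first while-loop: advance index while s[index] ≠ '='; returns the suffix at index
def aSkipToEq : List Char → List Char
  | [] => []
  | c :: cs => if c = '=' then c :: cs else aSkipToEq cs

-- second while-loop: skip spaces
def aSkipSpaces : List Char → List Char
  | [] => []
  | c :: cs => if c = ' ' then aSkipSpaces cs else c :: cs

-- third while-loop: accumulate result until ';'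
def aCollect (result : String) : List Char → String
  | [] => result
  | c :: cs => if c = ';' then result else aCollect (result ++ char_checking c) cs

def get_var_value (s : String) : String :=
  -- 'index += 1' after the first loop is the .tail (past the '=' or past the end)
  aCollect "" (aSkipSpaces ((aSkipToEq s.toList).tail))

-- ===== PORT B =====
-- str.partition(sep): (s[:i], sep, s[i+len(sep):]) at the first occurrence, else (s, '', '');
-- PySem has no partition, so it is ported by hand via find/slice (exact for nonempty sep).
def strPartition (s sep : String) : String × String × String :=
  let i := PySem.Str.find s sep
  if i = -1 then (s, "", "")
  else (PySem.Str.slice s none (some i), sep,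
        PySem.Str.slice s (some (i + (sep.toList.length : Int))) none)

def get_var_value_alt (s : String) : String :=
  -- '_, sep, rest = s.partition('=')' read back as the projections of strPartition
  if (strPartition s "=").2.1 = "" then ""
  else
    PySem.Str.replace
      (PySem.Str.replace
        (PySem.Str.replace
          (PySem.Str.replace ((strPartition (strPartition s "=").2.2 ";").1)
            "&" "&amp;") ">" "&gt;") "<" "&lt;") " " ""

-- ===== PRECONDITION & SPEC =====
def Spec_get_var_value (s : String) (out : String) : Prop := out = get_var_value_alt s
instance (s : String) (out : String) : Decidable (Spec_get_var_value s out) := by unfold Spec_get_var_value; infer_instance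

-- ===== CLAIM (what is proved, stated in full; the proofs are below) =====
def Claim_equal_get_var_value : Prop := ∀ (s : String), Dom_get_var_value s → Spec_get_var_value s (get_var_value s)

-- ===== LEMMAS AND PROOFS =====

-- what one character contributes to the output, as a char list
def escChars (c : Char) : List Char := (char_checking c).toList

lemma aSkipToEq_eq_dropWhile (cs : List Char) :
    aSkipToEq cs = cs.dropWhile (· ≠ '=') := by
  induction cs with
  | nil => rfl
  | cons c cs ih =>
    by_cases h : c = '='
    · simp [aSkipToEq, List.dropWhile, h]
    · simp [aSkipToEq, List.dropWhile, h, ih]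

lemma aSkipSpaces_eq_dropWhile (cs : List Char) :
    aSkipSpaces cs = cs.dropWhile (· = ' ') := by
  induction cs with
  | nil => rfl
  | cons c cs ih =>
    by_cases h : c = ' '
    · simp [aSkipSpaces, List.dropWhile, h, ih]
    · simp [aSkipSpaces, List.dropWhile, h]

lemma aCollect_toList (r : String) (cs : List Char) :
    (aCollect r cs).toList = r.toList ++ (cs.takeWhile (· ≠ ';')).flatMap escChars := by
  induction cs generalizing r with
  | nil => simp [aCollect]
  | cons c cs ih =>
    by_cases h : c = ';'
    · simp [aCollect, List.takeWhile, h]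
    · simp [aCollect, List.takeWhile, h, ih, escChars]

-- find's characterisation (first occurrence of a single character) → takeWhile/dropWhile
lemma takeWhile_drop_of_first (x : Char) (cs : List Char) (n : ℕ)
    (h1 : [x] <+: cs.drop n) (h2 : ∀ i < n, ¬ [x] <+: cs.drop i) :
    cs.takeWhile (· ≠ x) = cs.take n ∧ cs.dropWhile (· ≠ x) = cs.drop n := by
  induction cs generalizing n with
  | nil => simp at h1
  | cons c cs ih =>
    cases n with
    | zero =>
      simp only [List.drop_zero] at h1
      obtain ⟨t, ht⟩ := h1
      cases ht
      simp [List.takeWhile, List.dropWhile]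
    | succ n =>
      have hc : ¬ [x] <+: c :: cs := h2 0 (Nat.succ_pos _)
      have hcx : c ≠ x := by
        intro h; exact hc (by cases h; exact ⟨cs, rfl⟩)
      have H := ih n (by simpa using h1) (fun i hi => by
        have := h2 (i + 1) (by omega); simpa using this)
      rw [List.takeWhile_cons_of_pos (by simp [hcx]), List.dropWhile_cons_of_pos (by simp [hcx])]
      exact ⟨by rw [H.1]; rfl, by rw [H.2]; rfl⟩

lemma takeWhile_eq_self_of_not_mem (x : Char) (cs : List Char) (h : x ∉ cs) :
    cs.takeWhile (· ≠ x) = cs := by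
  induction cs with
  | nil => rfl
  | cons c cs ih =>
    simp only [List.mem_cons, not_or] at h
    rw [List.takeWhile_cons_of_pos (by simp [Ne.symm h.1]), ih h.2]

lemma singleton_infix_iff (x : Char) (cs : List Char) : [x] <:+: cs ↔ x ∈ cs := by
  constructor
  · intro h; exact h.subset (by simp)
  · intro h
    obtain ⟨a, b, rfl⟩ := List.append_of_mem h
    exact ⟨a, b, by simp⟩

-- leading spaces do not matter: they contribute nothing and are not ';'
lemma flatMap_esc_dropWhile_space (cs : List Char) :
    ((cs.dropWhile (· = ' ')).takeWhile (· ≠ ';')).flatMap escChars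
      = (cs.takeWhile (· ≠ ';')).flatMap escChars := by
  induction cs with
  | nil => rfl
  | cons c cs ih =>
    by_cases h : c = ' '
    · subst h
      simp only [List.dropWhile]
      simpa [List.takeWhile, escChars, char_checking] using ih
    · simp [List.dropWhile, h]

-- single-character replace is a per-character flatMap
lemma replace_go_single (x : Char) (new : List Char) (fuel : ℕ) (l acc : List Char)
    (h : l.length ≤ fuel) :
    PySem.Chars.replace.go [x] new fuel l acc
      = acc.reverse ++ l.flatMap (fun c => if c = x then new else [c]) := by
  induction fuel generalizing l acc with
  | zero =>
    have : l = [] := by cases l <;> simp_all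
    subst this
    simp [PySem.Chars.replace.go]
  | succ fuel ih =>
    cases l with
    | nil => simp [PySem.Chars.replace.go]
    | cons c t =>
      rw [PySem.Chars.replace.go]
      by_cases hcx : c = x
      · subst hcx
        have hp : [c].isPrefixOf (c :: t) = true := by simp [List.isPrefixOf]
        simp only [hp]
        rw [ih _ _ (by simpa using Nat.le_of_succ_le_succ h)]
        simp
      · have hp : [x].isPrefixOf (c :: t) = false := by
          simp [List.isPrefixOf, Ne.symm hcx]
        simp only [hp]
        rw [if_neg (by simp)]
        rw [ih _ _ (by simpa using Nat.le_of_succ_le_succ h)]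
        simp [hcx]

lemma replace_single (x : Char) (new : List Char) (cs : List Char) :
    PySem.Chars.replace cs [x] new = cs.flatMap (fun c => if c = x then new else [c]) := by
  rw [PySem.Chars.replace]
  simp only [List.isEmpty_cons, Bool.false_eq_true, if_false]
  exact replace_go_single x new cs.length cs [] le_rfl

-- the composed per-character effect of the four replace passes is char_checking
lemma chainChar (c : Char) :
    (((if c = '&' then "&amp;".toList else [c]).flatMap
        (fun d => if d = '>' then "&gt;".toList else [d])).flatMap
          (fun d => if d = '<' then "&lt;".toList else [d])).flatMap
            (fun d => if d = ' ' then ([] : List Char) else [d]) = escChars c := by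
  by_cases h1 : c = '&'
  · subst h1; decide
  · by_cases h2 : c = '>'
    · subst h2; decide
    · by_cases h3 : c = '<'
      · subst h3; decide
      · by_cases h4 : c = ' '
        · subst h4; decide
        · simp [h1, h2, h3, h4, escChars, char_checking]

-- the four staged replace passes are the per-character escaping, on char lists
lemma chain_toList (v : List Char) :
    PySem.Chars.replace
      (PySem.Chars.replace
        (PySem.Chars.replace
          (PySem.Chars.replace v ['&'] "&amp;".toList) ['>'] "&gt;".toList) ['<'] "&lt;".toList)
      [' '] ([] : List Char) = v.flatMap escChars := by
  rw [replace_single, replace_single, replace_single, replace_single]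
  induction v with
  | nil => rfl
  | cons c v ih => simp only [List.flatMap_cons, List.flatMap_append, ih, chainChar]

lemma partition_fst (r sep : String) :
    (strPartition r sep).1
      = if PySem.Str.find r sep = -1 then r
        else PySem.Str.slice r none (some (PySem.Str.find r sep)) := by
  unfold strPartition
  by_cases h : PySem.Str.find r sep = -1
  · rw [if_pos h, if_pos h]
  · rw [if_neg h, if_neg h]

lemma partition_snd_fst (r sep : String) :
    (strPartition r sep).2.1 = if PySem.Str.find r sep = -1 then "" else sep := by
  unfold strPartition
  by_cases h : PySem.Str.find r sep = -1
  · rw [if_pos h, if_pos h]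
  · rw [if_neg h, if_neg h]

lemma partition_snd_snd (r sep : String) :
    (strPartition r sep).2.2
      = if PySem.Str.find r sep = -1 then ""
        else PySem.Str.slice r (some (PySem.Str.find r sep + (sep.toList.length : Int))) none := by
  unfold strPartition
  by_cases h : PySem.Str.find r sep = -1
  · rw [if_pos h, if_pos h]
  · rw [if_neg h, if_neg h]

-- ===== VERDICT (by name: the statement is the Claim_ definition above) =====
theorem get_var_value_spec : Claim_equal_get_var_value := by
  intro s _
  unfold Spec_get_var_value get_var_value get_var_value_alt
  rw [partition_snd_fst, partition_snd_snd, partition_fst]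
  by_cases heq : PySem.Str.find s "=" = -1
  · -- no '=': A's first loop runs off the end; B's partition finds no separator
    have hnm : '=' ∉ s.toList := by
      have := (PySem.Str.find_eq_neg_one_iff (s := s) (sub := "=")).mp heq
      simpa [singleton_infix_iff] using this
    have hdw : s.toList.dropWhile (· ≠ '=') = [] := by
      rw [List.dropWhile_eq_nil_iff]
      intro x hx
      simp only [ne_eq, decide_not, Bool.not_eq_true', decide_eq_false_iff_not] at *
      rintro rfl; exact hnm hx
    rw [if_pos heq, if_pos heq, if_pos rfl, aSkipToEq_eq_dropWhile, hdw]
    rfl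
  · -- '=' found at index k
    have hbr : PySem.Str.find s "=" = PySem.Chars.find s.toList ['='] := by simp
    have hk0 : 0 ≤ PySem.Str.find s "=" := by
      have h1 := PySem.Chars.neg_one_le_find (s := s.toList) (sub := ['='])
      omega
    obtain ⟨k, hk⟩ : ∃ k : ℕ, PySem.Str.find s "=" = (k : ℤ) :=
      ⟨(PySem.Str.find s "=").toNat, (Int.toNat_of_nonneg hk0).symm⟩
    have hfe : PySem.Chars.find s.toList ['='] = (k : ℤ) := by omega
    have hspec := PySem.Chars.find_spec (s := s.toList) (sub := ['='])
      (by rw [hfe]; exact Int.natCast_nonneg k)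
    rw [hfe] at hspec
    simp only [Int.toNat_natCast] at hspec
    have hdw := (takeWhile_drop_of_first '=' s.toList k hspec.1 (fun i hi => hspec.2 i hi)).2
    have hA1 : (aSkipToEq s.toList).tail = s.toList.drop (k + 1) := by
      rw [aSkipToEq_eq_dropWhile, hdw, List.tail_drop]
    have hB1 : (PySem.Str.slice s (some (PySem.Str.find s "=" + ("=".toList.length : Int))) none).toList
        = s.toList.drop (k + 1) := by
      rw [PySem.Str.toList_slice, PySem.Chars.slice_eq_listSlice, hk,
        PySem.List.slice_from _ (by positivity)]
      congr 1
    set rest := PySem.Str.slice s (some (PySem.Str.find s "=" + ("=".toList.length : Int))) none with hrest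
    have hvs : (if PySem.Str.find rest ";" = -1 then rest
          else PySem.Str.slice rest none (some (PySem.Str.find rest ";"))).toList
        = (s.toList.drop (k + 1)).takeWhile (· ≠ ';') := by
      have hbr2 : PySem.Str.find rest ";" = PySem.Chars.find (s.toList.drop (k + 1)) [';'] := by
        rw [← hB1]; simp
      by_cases hsemi : PySem.Str.find rest ";" = -1
      · rw [if_pos hsemi, hB1]
        have hnm : ';' ∉ s.toList.drop (k + 1) := by
          have := (PySem.Str.find_eq_neg_one_iff (s := rest) (sub := ";")).mp hsemi
          rw [hB1] at this
          simpa [singleton_infix_iff] using this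
        exact (takeWhile_eq_self_of_not_mem ';' _ hnm).symm
      · rw [if_neg hsemi]
        have hm0 : 0 ≤ PySem.Chars.find (s.toList.drop (k + 1)) [';'] := by
          have h1 := PySem.Chars.neg_one_le_find (s := s.toList.drop (k + 1)) (sub := [';'])
          omega
        obtain ⟨m, hm⟩ : ∃ m : ℕ, PySem.Chars.find (s.toList.drop (k + 1)) [';'] = (m : ℤ) :=
          ⟨_, (Int.toNat_of_nonneg hm0).symm⟩
        have hspec2 := PySem.Chars.find_spec (s := s.toList.drop (k + 1)) (sub := [';'])
          (by rw [hm]; exact Int.natCast_nonneg m)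
        rw [hm] at hspec2
        simp only [Int.toNat_natCast] at hspec2
        have htw := (takeWhile_drop_of_first ';' (s.toList.drop (k + 1)) m hspec2.1
          (fun i hi => hspec2.2 i hi)).1
        rw [PySem.Str.toList_slice, PySem.Chars.slice_eq_listSlice, hbr2, hm,
          PySem.List.slice_to _ (Int.natCast_nonneg m), hB1, htw, Int.toNat_natCast]
    rw [if_neg heq, if_neg heq, if_neg (by decide : ("=" : String) ≠ "")]
    apply String.toList_inj.mp
    rw [aCollect_toList, aSkipSpaces_eq_dropWhile, hA1,
      PySem.Str.toList_replace, PySem.Str.toList_replace, PySem.Str.toList_replace,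
      PySem.Str.toList_replace]
    have hlit : (" ".toList = [' ']) ∧ ("&".toList = ['&']) ∧ (">".toList = ['>'])
        ∧ ("<".toList = ['<']) ∧ (("" : String).toList = []) := by decide
    rw [hlit.1, hlit.2.1, hlit.2.2.1, hlit.2.2.2.1, hlit.2.2.2.2, chain_toList, hvs,
      flatMap_esc_dropWhile_space]
    rfl
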